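-- pv_equiv track=rewrite | github.com/lara-aras/python-voucher-processor | voucher_processor.py | split_file
-- ===== SOURCE A (Python) =====
-- def split_file(file_data):
--     header = {}
--     line_items = []
--     voucher_summaries = {}
--     body = {}
--     header_done = False
--     voucher_counter = 1
--
--     for line in file_data:
--         # use header_done variable to check if line is part of the header or the body
--         if not header_done:
--             header_field, header_value = line.replace("\n", "").split(":")
--
--             if header_field == "voucher_summary":
--                 # add voucher summaries to their own dictionary
--                 description, num_vouchers, total_value = header_value.split(",")
--                 voucher_summaries[description] = {"num_vouchers": num_vouchers,
--                                                   "total_value": total_value}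
--             elif header_field == "line_item":
--                 # add line items to their own list
--                 line_items.append(header_value)
--             else:
--                 header[header_field] = header_value
--         else:
--             voucher_description, pin, serial_number, expiry_date = line.replace("\n", "").split(",")
--
--             body[voucher_counter] = {"pin": pin,
--                                      "description": voucher_description,
--                                      "serial_number": serial_number,
--                                      "expiry_date": expiry_date}
--             voucher_counter += 1
--
--         # last line of header is voucher fields
--         if "voucher_fields" in line:
--             header_done = True
--
--     return header, line_items, voucher_summaries, body
-- ===== SOURCE B (Python) =====
-- def split_file(file_data):
--     lines = list(file_data)
--     i = next((k for k, l in enumerate(lines) if "voucher_fields" in l), len(lines))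
--     parsed = [l.replace("\n", "").split(":") for l in lines[:i + 1]]
--     header = {f: v for f, v in parsed if f != "voucher_summary" and f != "line_item"}
--     line_items = [v for f, v in parsed if f == "line_item"]
--     voucher_summaries = {d: {"num_vouchers": n, "total_value": t}
--                          for d, n, t in (v.split(",") for f, v in parsed if f == "voucher_summary")}
--     body = {c: {"pin": p, "description": d, "serial_number": s, "expiry_date": e}
--             for c, (d, p, s, e) in enumerate((l.replace("\n", "").split(",") for l in lines[i + 1:]), 1)}
--     return header, line_items, voucher_summaries, body
-- ===== Notes on version B (the rewrite author's own statement) =====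
-- stated objective: alternative
-- what changed: Replaces A's single stateful loop (header_done flag, running counter, four accumulators updated in one pass) by a staged decomposition: find the first 'voucher_fields' line, parse the inclusive header slice once into a list, then build header, line_items and voucher_summaries by three independent filtered comprehensions and the body by a dict comprehension over enumerate of the tail.
import Mathlib
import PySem

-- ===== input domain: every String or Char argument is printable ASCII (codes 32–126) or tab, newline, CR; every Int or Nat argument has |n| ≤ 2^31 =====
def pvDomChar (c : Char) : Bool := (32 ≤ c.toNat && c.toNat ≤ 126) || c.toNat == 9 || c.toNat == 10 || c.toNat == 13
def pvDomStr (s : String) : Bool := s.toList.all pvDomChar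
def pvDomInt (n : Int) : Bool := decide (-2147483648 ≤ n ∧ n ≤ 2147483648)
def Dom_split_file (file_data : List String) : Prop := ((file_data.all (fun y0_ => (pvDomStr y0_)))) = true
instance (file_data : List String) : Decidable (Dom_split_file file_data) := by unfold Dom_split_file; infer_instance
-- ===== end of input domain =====

-- B replaces A's single stateful loop (header_done flag + counter) by a boundary search, one parsing
-- pass over the header slice and independent filtered comprehensions; return-value equivalence only.

-- ===== PORT A =====
-- state: (header, line_items, voucher_summaries, body, header_done, voucher_counter)
abbrev PVState := PySem.Dict String String × List String × PySem.Dict String (List (String × String)) × PySem.Dict Int (List (String × String)) × Bool × Int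

-- one iteration of A's loop; where Python raises (wrong split arity, excluded by Pre_) the line is skipped
def stepA (st : PVState) (line : String) : PVState :=
  let (h, li, vs, b, done, c) := st
  let st1 : PVState :=
    if done = false then
      match PySem.Str.split? (PySem.Str.replace line "\n" "") ":" with
      | some [hf, hv] =>
        if hf = "voucher_summary" then
          match PySem.Str.split? hv "," with
          | some [d, n, t] => (h, li, vs.insert d [("num_vouchers", n), ("total_value", t)], b, done, c)
          | _ => (h, li, vs, b, done, c)
        else if hf = "line_item" then (h, li ++ [hv], vs, b, done, c)
        else (h.insert hf hv, li, vs, b, done, c)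
      | _ => (h, li, vs, b, done, c)
    else
      match PySem.Str.split? (PySem.Str.replace line "\n" "") "," with
      | some [vd, pin, sn, ed] =>
        (h, li, vs, b.insert c [("pin", pin), ("description", vd), ("serial_number", sn), ("expiry_date", ed)], done, c + 1)
      | _ => (h, li, vs, b, done, c + 1)
  if PySem.Str.isIn "voucher_fields" line then
    (st1.1, st1.2.1, st1.2.2.1, st1.2.2.2.1, true, st1.2.2.2.2.2)
  else st1

def split_file (file_data : List String) : (List (String × String)) × List String × (List (String × List (String × String))) × (List (Int × List (String × String))) :=
  let fin := file_data.foldl stepA (PySem.Dict.empty, [], PySem.Dict.empty, PySem.Dict.empty, false, 1)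
  (PySem.Dict.items fin.1, fin.2.1, PySem.Dict.items fin.2.2.1, PySem.Dict.items fin.2.2.2.1)

-- ===== PORT B =====
-- l.replace("\n", "").split(":")   (split? is none only for an empty separator, so getD [] never fires)
def splitHdr (l : String) : List String :=
  (PySem.Str.split? (PySem.Str.replace l "\n" "") ":").getD []

-- the pair a parsed header line contributes to the header dict comprehension (none = filtered out / skipped)
def hdrPair? (p : List String) : Option (String × String) :=
  match p with
  | [f, v] => if f ≠ "voucher_summary" ∧ f ≠ "line_item" then some (f, v) else none
  | _ => none

-- the value a parsed header line contributes to the line_items comprehension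
def itemVal? (p : List String) : Option String :=
  match p with
  | [f, v] => if f = "line_item" then some v else none
  | _ => none

-- the pair a parsed header line contributes to the voucher_summaries comprehension
def sumPair? (p : List String) : Option (String × List (String × String)) :=
  match p with
  | [f, v] =>
    if f = "voucher_summary" then
      match (PySem.Str.split? v ",").getD [] with
      | [d, n, t] => some (d, [("num_vouchers", n), ("total_value", t)])
      | _ => none
    else none
  | _ => none

-- the record an enumerated body line contributes to the body dict comprehension
def bodyRec? (p : Int × String) : Option (Int × List (String × String)) :=
  match (PySem.Str.split? (PySem.Str.replace p.2 "\n" "") ",").getD [] with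
  | [vd, pin, sn, ed] =>
    some (p.1, [("pin", pin), ("description", vd), ("serial_number", sn), ("expiry_date", ed)])
  | _ => none

-- a dict comprehension = insert the produced pairs in order
def insPair {κ ν : Type} [BEq κ] (d : PySem.Dict κ ν) (q : κ × ν) : PySem.Dict κ ν :=
  d.insert q.1 q.2

def split_file_alt (file_data : List String) : (List (String × String)) × List String × (List (String × List (String × String))) × (List (Int × List (String × String))) :=
  let i := match file_data.findIdx? (fun l => PySem.Str.isIn "voucher_fields" l) with
           | some k => k
           | none => file_data.length
  let parsed := (file_data.take (i + 1)).map splitHdr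
  let header := (parsed.filterMap hdrPair?).foldl insPair PySem.Dict.empty
  let line_items := parsed.filterMap itemVal?
  let voucher_summaries := (parsed.filterMap sumPair?).foldl insPair PySem.Dict.empty
  let body := ((PySem.List.enumerate (file_data.drop (i + 1)) 1).filterMap bodyRec?).foldl insPair PySem.Dict.empty
  (header.items, line_items, voucher_summaries.items, body.items)

-- ===== PRECONDITION & SPEC =====
-- a header line must split on ':' into exactly 2 pieces (and a voucher_summary value on ',' into 3)
def pvGoodHeaderLine (line : String) : Bool :=
  match PySem.Str.split? (PySem.Str.replace line "\n" "") ":" with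
  | some [hf, hv] =>
    if hf = "voucher_summary" then
      (match PySem.Str.split? hv "," with | some [_, _, _] => true | _ => false)
    else true
  | _ => false

-- a body line must split on ',' into exactly 4 pieces
def pvGoodBodyLine (line : String) : Bool :=
  match PySem.Str.split? (PySem.Str.replace line "\n" "") "," with
  | some [_, _, _, _] => true
  | _ => false

-- Pre_ excludes exactly the inputs where Python A (and B) raises ValueError: a line up to and
-- including the first one containing "voucher_fields" whose ':'-split arity is not 2 (or a
-- voucher_summary value whose ','-split arity is not 3), or a later line whose ','-split arity is
-- not 4.  Both ports skip such a line in the same way, so the equivalence proof below actually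
-- holds unconditionally; Pre_ marks where the ports are faithful to their Pythons.
def Pre_split_file (file_data : List String) : Prop :=
  let i := match file_data.findIdx? (fun l => PySem.Str.isIn "voucher_fields" l) with
           | some k => k
           | none => file_data.length
  (file_data.take (i + 1)).all pvGoodHeaderLine = true ∧ (file_data.drop (i + 1)).all pvGoodBodyLine = true

instance (file_data : List String) : Decidable (Pre_split_file file_data) := by
  unfold Pre_split_file; infer_instance

def pvWitness_split_file : List String :=
  ["vendor:acme", "voucher_summary:a,2,30", "line_item:x", "voucher_fields:desc,pin,sn,exp", "a,1,2,3"]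

def Spec_split_file (file_data : List String) (out : (List (String × String)) × List String × (List (String × List (String × String))) × (List (Int × List (String × String)))) : Prop := out = split_file_alt file_data
instance (file_data : List String) (out : (List (String × String)) × List String × (List (String × List (String × String))) × (List (Int × List (String × String)))) : Decidable (Spec_split_file file_data out) := by
  unfold Spec_split_file
  letI h1 : DecidableEq (List (Int × List (String × String))) := inferInstance
  letI h2 : DecidableEq (List (String × List (String × String))) := inferInstance
  letI h3 : DecidableEq (List (String × String)) := inferInstance
  infer_instance

-- ===== CLAIM (what is proved, stated in full; the proofs are below) =====
def Claim_equal_split_file : Prop := ∀ (file_data : List String), Dom_split_file file_data → Pre_split_file file_data → Spec_split_file file_data (split_file file_data)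

-- ===== LEMMAS AND PROOFS =====

lemma stepA_body (h : PySem.Dict String String) (li : List String)
    (vs : PySem.Dict String (List (String × String))) (b : PySem.Dict Int (List (String × String)))
    (c : Int) (l : String) :
    stepA (h, li, vs, b, true, c) l = (h, li, vs, (bodyRec? (c, l)).elim b (insPair b), true, c + 1) := by
  simp only [stepA, bodyRec?, insPair]
  cases hs : PySem.Str.split? (PySem.Str.replace l "\n" "") "," with
  | none => cases hin : PySem.Str.isIn "voucher_fields" l <;> simp only [hin] <;> simp [hs, insPair]
  | some parts =>
    match parts with
    | [vd, pin, sn, ed] => cases hin : PySem.Str.isIn "voucher_fields" l <;> simp only [hin] <;> simp [hs, insPair]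
    | [] | [_] | [_, _] | [_, _, _] | _ :: _ :: _ :: _ :: _ :: _ =>
      cases hin : PySem.Str.isIn "voucher_fields" l <;> simp only [hin] <;> simp [hs, insPair]

lemma body_phase (ls : List String) (h : PySem.Dict String String) (li : List String)
    (vs : PySem.Dict String (List (String × String))) (b : PySem.Dict Int (List (String × String))) (c : Int) :
    ls.foldl stepA (h, li, vs, b, true, c) =
      (h, li, vs, ((PySem.List.enumerate ls c).filterMap bodyRec?).foldl insPair b, true, c + ls.length) := by
  induction ls generalizing b c with
  | nil => simp
  | cons l ls ih =>
    rw [List.foldl_cons, stepA_body, ih, PySem.List.enumerate_cons]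
    cases hr : bodyRec? (c, l) with
    | none =>
      simp only [List.filterMap_cons, hr, Option.elim, List.length_cons, Prod.mk.injEq, and_true, true_and]
      push_cast; ring
    | some r =>
      simp only [List.filterMap_cons, hr, Option.elim, List.foldl_cons, List.length_cons,
        Prod.mk.injEq, and_true, true_and]
      push_cast; ring

lemma stepA_header (h : PySem.Dict String String) (li : List String)
    (vs : PySem.Dict String (List (String × String))) (b : PySem.Dict Int (List (String × String)))
    (c : Int) (l : String) :
    stepA (h, li, vs, b, false, c) l =
      ((hdrPair? (splitHdr l)).elim h (insPair h),
       li ++ (itemVal? (splitHdr l)).toList,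
       (sumPair? (splitHdr l)).elim vs (insPair vs),
       b, PySem.Str.isIn "voucher_fields" l, c) := by
  simp only [stepA, splitHdr, hdrPair?, itemVal?, sumPair?, insPair]
  cases hs : PySem.Str.split? (PySem.Str.replace l "\n" "") ":" with
  | none => cases hin : PySem.Str.isIn "voucher_fields" l <;> simp only [hin] <;> simp [hs, insPair]
  | some parts =>
    match parts with
    | [hf, hv] =>
      by_cases h1 : hf = "voucher_summary"
      · cases h2 : PySem.Str.split? hv "," with
        | none => cases hin : PySem.Str.isIn "voucher_fields" l <;> simp only [hin] <;> simp [hs, h1, h2, insPair]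
        | some ps =>
          match ps with
          | [d, n, t] => cases hin : PySem.Str.isIn "voucher_fields" l <;> simp only [hin] <;> simp [hs, h1, h2, insPair]
          | [] | [_] | [_, _] | _ :: _ :: _ :: _ :: _ =>
            cases hin : PySem.Str.isIn "voucher_fields" l <;> simp only [hin] <;> simp [hs, h1, h2, insPair]
      · by_cases h3 : hf = "line_item" <;>
          cases hin : PySem.Str.isIn "voucher_fields" l <;> simp only [hin] <;> simp [hs, h1, h3, insPair]
    | [] | [_] | _ :: _ :: _ :: _ =>
      cases hin : PySem.Str.isIn "voucher_fields" l <;> simp only [hin] <;> simp [hs, insPair]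

lemma main_split (ls : List String) (h : PySem.Dict String String) (li : List String)
    (vs : PySem.Dict String (List (String × String))) :
    (let fin := ls.foldl stepA (h, li, vs, PySem.Dict.empty, false, 1)
     (fin.1, fin.2.1, fin.2.2.1, fin.2.2.2.1)) =
      (let i := match ls.findIdx? (fun l => PySem.Str.isIn "voucher_fields" l) with
                | some k => k
                | none => ls.length
       let parsed := (ls.take (i + 1)).map splitHdr
       ((parsed.filterMap hdrPair?).foldl insPair h,
        li ++ parsed.filterMap itemVal?,
        (parsed.filterMap sumPair?).foldl insPair vs,
        ((PySem.List.enumerate (ls.drop (i + 1)) 1).filterMap bodyRec?).foldl insPair PySem.Dict.empty)) := by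
  induction ls generalizing h li vs with
  | nil => simp
  | cons l ls ih =>
    cases hin : PySem.Str.isIn "voucher_fields" l with
    | true =>
      have hidx : (l :: ls).findIdx? (fun l => PySem.Str.isIn "voucher_fields" l) = some 0 := by
        simp only [List.findIdx?_cons]
        simp only [show (PySem.Str.isIn "voucher_fields" l) = true from hin]
        rfl
      simp only [hidx, List.foldl_cons, stepA_header, hin]
      simp only [List.take_succ_cons, List.take_zero, List.drop_succ_cons, List.drop_zero, body_phase]
      cases h1 : hdrPair? (splitHdr l) <;> cases h2 : itemVal? (splitHdr l) <;>
        cases h3 : sumPair? (splitHdr l) <;>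
        simp [List.filterMap_cons, h1, h2, h3, Option.elim]
    | false =>
      have hidx : (l :: ls).findIdx? (fun l => PySem.Str.isIn "voucher_fields" l) =
          (ls.findIdx? (fun l => PySem.Str.isIn "voucher_fields" l)).map (· + 1) := by
        simp only [List.findIdx?_cons]
        simp only [show (PySem.Str.isIn "voucher_fields" l) = false from hin]
        rfl
      simp only [hidx, List.foldl_cons, stepA_header, hin]
      have hIH := ih ((hdrPair? (splitHdr l)).elim h (insPair h))
        (li ++ (itemVal? (splitHdr l)).toList)
        ((sumPair? (splitHdr l)).elim vs (insPair vs))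
      simp only at hIH
      cases hf : ls.findIdx? (fun l => PySem.Str.isIn "voucher_fields" l) with
      | none =>
        rw [hf] at hIH
        simp only [Option.map_none, List.length_cons, List.take_succ_cons, List.drop_succ_cons,
          List.map_cons] at hIH ⊢
        rw [hIH]
        cases h1 : hdrPair? (splitHdr l) <;> cases h2 : itemVal? (splitHdr l) <;>
          cases h3 : sumPair? (splitHdr l) <;>
          simp [List.filterMap_cons, h1, h2, h3, Option.elim]
      | some k =>
        rw [hf] at hIH
        simp only [Option.map_some, List.take_succ_cons, List.drop_succ_cons, List.map_cons] at hIH ⊢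
        rw [hIH]
        cases h1 : hdrPair? (splitHdr l) <;> cases h2 : itemVal? (splitHdr l) <;>
          cases h3 : sumPair? (splitHdr l) <;>
          simp [List.filterMap_cons, h1, h2, h3, Option.elim]

-- ===== VERDICT (by name: the statement is the Claim_ definition above) =====
theorem split_file_spec : Claim_equal_split_file := by
  intro file_data _ _
  unfold Spec_split_file split_file split_file_alt
  have hm := main_split file_data PySem.Dict.empty [] PySem.Dict.empty
  simp only at hm ⊢
  have h1 := congrArg (fun t => t.1) hm
  have h2 := congrArg (fun t => t.2.1) hm
  have h3 := congrArg (fun t => t.2.2.1) hm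
  have h4 := congrArg (fun t => t.2.2.2) hm
  simp only at h1 h2 h3 h4
  rw [h1, h2, h3, h4]
  simp
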